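-- pv_equiv track=rewrite | github.com/mdsahmad39/Yatzy-Game | Yatzy_Game.py | double_pair
-- ===== SOURCE A (Python) =====
-- def double_pair(dice_s, p_layer):
--     score_for_double_pair = 0
--     lis_t = set(dice_s)
--     for i in lis_t:
--         dice_s.remove(i)
--     if len(dice_s) > 1:
--         score_for_double_pair += 2 * sum(dice_s)
--     return score_for_double_pair
-- ===== SOURCE B (Python) =====
-- def double_pair(dice_s, p_layer):
--     seen = set()
--     dups = []
--     for x in dice_s:
--         if x in seen:
--             dups.append(x)
--         else:
--             seen.add(x)
--     dice_s[:] = dups  # same in-place mutation as A: first occurrences dropped, order kept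
--     return 2 * sum(dups) if len(dups) > 1 else 0
-- ===== Notes on version B (the rewrite author's own statement) =====
-- stated objective: faster
-- what changed: Replaces A's build-a-set-then-remove-each-first-occurrence loop (one list.remove scan per distinct value) by a single forward pass with a seen set that directly collects the non-first occurrences, mutating the argument in place with slice assignment.
import Mathlib
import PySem

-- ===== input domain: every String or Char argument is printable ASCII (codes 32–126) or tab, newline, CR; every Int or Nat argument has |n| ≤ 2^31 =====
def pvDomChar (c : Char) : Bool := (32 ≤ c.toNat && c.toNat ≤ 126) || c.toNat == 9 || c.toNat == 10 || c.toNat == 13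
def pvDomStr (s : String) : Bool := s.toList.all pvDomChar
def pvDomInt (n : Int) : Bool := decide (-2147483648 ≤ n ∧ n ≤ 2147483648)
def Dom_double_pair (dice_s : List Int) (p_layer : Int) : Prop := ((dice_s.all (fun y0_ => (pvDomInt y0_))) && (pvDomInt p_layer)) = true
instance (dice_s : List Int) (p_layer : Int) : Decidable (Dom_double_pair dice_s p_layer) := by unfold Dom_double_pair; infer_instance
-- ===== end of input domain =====

-- B replaces A's set-then-remove-each-first-occurrence loop by one forward pass collecting
-- non-first occurrences (simpler, one pass). Both Pythons mutate dice_s in place identically;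
-- the theorems here are about the return value.


-- ===== PORT A =====
-- 'for i in lis_t: dice_s.remove(i)': each i is a member of the current list (lis_t holds the
-- distinct values of dice_s and nodup), so list.remove never raises; .getD is never the default.
-- The return value does not depend on the set's iteration order (proved below).
def double_pair (dice_s : List Int) (p_layer : Int) : Int :=
  let lis_t : PySem.Set Int := PySem.Set.ofList dice_s
  let rest := lis_t.foldl (fun st i => (PySem.List.remove? st i).getD st) dice_s
  if 1 < rest.length then 2 * rest.sum else 0

-- ===== PORT B =====
def dupsGo : List Int → PySem.Set Int → List Int
  | [], _ => []
  | x :: xs, seen =>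
      if PySem.Set.contains seen x then x :: dupsGo xs seen
      else dupsGo xs (PySem.Set.add seen x)

def double_pair_alt (dice_s : List Int) (p_layer : Int) : Int :=
  let dups := dupsGo dice_s PySem.Set.empty
  if 1 < dups.length then 2 * dups.sum else 0

-- ===== PRECONDITION & SPEC =====
def Spec_double_pair (dice_s : List Int) (p_layer : Int) (out : Int) : Prop := out = double_pair_alt dice_s p_layer
instance (dice_s : List Int) (p_layer : Int) (out : Int) : Decidable (Spec_double_pair dice_s p_layer out) := by unfold Spec_double_pair; infer_instance

-- ===== CLAIM (what is proved, stated in full; the proofs are below) =====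
def Claim_equal_double_pair : Prop := ∀ (dice_s : List Int) (p_layer : Int), Dom_double_pair dice_s p_layer → Spec_double_pair dice_s p_layer (double_pair dice_s p_layer)

-- ===== LEMMAS AND PROOFS =====

-- A-side: removing one occurrence of each element of a duplicate-free list xs ⊆ l drops
-- exactly xs.length elements and xs.sum from the sum.
theorem removeFold_len_sum (xs : List Int) : ∀ (l : List Int), xs.Nodup → (∀ x ∈ xs, x ∈ l) →
    (xs.foldl (fun st i => (PySem.List.remove? st i).getD st) l).length + xs.length = l.length ∧
    (xs.foldl (fun st i => (PySem.List.remove? st i).getD st) l).sum + xs.sum = l.sum := by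
  induction xs with
  | nil => intro l _ _; simp
  | cons x xs ih =>
      intro l hnd hmem
      have hx : x ∈ l := hmem x (List.mem_cons_self)
      have hstep : (PySem.List.remove? l x).getD l = l.erase x := by
        rw [PySem.List.remove?_eq_some_erase l x hx]; rfl
      have hperm : List.Perm l (x :: l.erase x) := List.perm_cons_erase hx
      have hnd' : xs.Nodup := (List.nodup_cons.mp hnd).2
      have hxn : x ∉ xs := (List.nodup_cons.mp hnd).1
      have hmem' : ∀ y ∈ xs, y ∈ l.erase x := by
        intro y hy
        exact (List.mem_erase_of_ne (by rintro rfl; exact hxn hy)).mpr (hmem y (List.mem_cons_of_mem _ hy))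
      have := ih (l.erase x) hnd' hmem'
      have hlen : (l.erase x).length + 1 = l.length := by
        have := hperm.length_eq; simpa using this.symm
      have hsum : (l.erase x).sum + x = l.sum := by
        have := hperm.sum_eq; simp at this; omega
      simp only [List.foldl_cons, hstep, List.length_cons, List.sum_cons]
      omega

-- B-side: the pass keeps the non-first occurrences; the new distinct elements go to seen.
theorem dupsGo_len_sum (l : List Int) : ∀ (seen : PySem.Set Int),
    (dupsGo l seen).length + (PySem.Set.update seen l).length = l.length + seen.length ∧
    (dupsGo l seen).sum + (PySem.Set.update seen l).sum = l.sum + seen.sum := by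
  induction l with
  | nil => intro seen; simp [dupsGo, PySem.Set.update]
  | cons x xs ih =>
      intro seen
      rw [PySem.Set.update_cons]
      by_cases hx : x ∈ seen
      · have hc : PySem.Set.contains seen x = true := (PySem.Set.contains_iff seen x).mpr hx
        have hadd : PySem.Set.add seen x = seen := PySem.Set.add_of_mem hx
        have := ih seen
        simp only [dupsGo, hc, if_true, hadd, List.length_cons, List.sum_cons]
        omega
      · have hc : PySem.Set.contains seen x = false := by
          cases h : PySem.Set.contains seen x
          · rfl
          · exact absurd ((PySem.Set.contains_iff seen x).mp h) hx
        have hadd : PySem.Set.add seen x = seen ++ [x] := PySem.Set.add_of_not_mem hx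
        have := ih (PySem.Set.add seen x)
        simp only [dupsGo, hc, Bool.false_eq_true, if_false, hadd, List.length_cons,
          List.sum_cons, List.length_append, List.sum_append, List.length_nil, List.sum_nil] at this ⊢
        omega

-- ===== VERDICT (by name: the statement is the Claim_ definition above) =====
theorem double_pair_spec : Claim_equal_double_pair := by
  intro dice_s p_layer _
  unfold Spec_double_pair double_pair double_pair_alt
  have hA := removeFold_len_sum (PySem.Set.ofList dice_s) dice_s
      (PySem.Set.nodup_ofList dice_s) (fun x hx => (PySem.Set.mem_ofList dice_s x).mp hx)
  have hB := dupsGo_len_sum dice_s PySem.Set.empty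
  rw [PySem.Set.update_empty] at hB
  simp only [PySem.Set.empty, List.length_nil, List.sum_nil, add_zero] at hB ⊢
  have hlen : (PySem.Set.ofList dice_s |>.foldl (fun st i => (PySem.List.remove? st i).getD st) dice_s).length
      = (dupsGo dice_s []).length := by omega
  have hsum : (PySem.Set.ofList dice_s |>.foldl (fun st i => (PySem.List.remove? st i).getD st) dice_s).sum
      = (dupsGo dice_s []).sum := by omega
  simp only [hlen, hsum]
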